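-- pv_equiv track=rewrite | github.com/kulikov0/red_eyes_is_all_you_need | scripts/tests/rtl_ops.py | lod24
-- ===== SOURCE A (Python) =====
-- def lod24(val):
--     if val == 0:
--         return 0
--     k = 0
--     for i in range(24):
--         if val & (1 << i):
--             k = i
--     return k
-- ===== SOURCE B (Python) =====
-- def lod24(val):
--     m = val & 0xFFFFFF
--     return m.bit_length() - 1 if m else 0
-- ===== Notes on version B (the rewrite author's own statement) =====
-- stated objective: idiomatic
-- what changed: Replaces the 24-iteration bit-scan loop with a closed-form computation: mask to the low 24 bits and use int.bit_length() to get the highest set bit index.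
import Mathlib
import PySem

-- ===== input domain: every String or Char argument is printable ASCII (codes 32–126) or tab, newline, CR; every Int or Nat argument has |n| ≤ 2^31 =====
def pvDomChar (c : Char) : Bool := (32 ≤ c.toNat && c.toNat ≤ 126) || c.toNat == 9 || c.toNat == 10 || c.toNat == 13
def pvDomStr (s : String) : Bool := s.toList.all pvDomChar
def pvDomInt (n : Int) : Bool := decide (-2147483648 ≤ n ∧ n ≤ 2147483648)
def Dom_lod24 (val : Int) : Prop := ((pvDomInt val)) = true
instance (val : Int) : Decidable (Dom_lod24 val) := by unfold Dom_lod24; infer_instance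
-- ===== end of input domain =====

-- B replaces A's 24-iteration bit-scan loop by masking to the low 24 bits and reading
-- int.bit_length() - 1 (a closed form for the highest set bit); equivalence proved for all Int inputs.

-- ===== PORT A =====
def lod24 (val : Int) : Int :=
  if val = 0 then 0
  else
    (PySem.List.pyRange 0 24).foldl
      (fun k i => if PySem.Int.band val ((1 : Int) <<< (i.toNat : Int)) ≠ 0 then i else k) 0

-- ===== PORT B =====
-- m.bit_length() - 1 is ported as (PySem.Int.bitLength m : Int) - 1 (Python-exact).
def lod24_alt (val : Int) : Int :=
  let m := PySem.Int.band val 0xFFFFFF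
  if m ≠ 0 then (PySem.Int.bitLength m : Int) - 1 else 0

-- ===== PRECONDITION & SPEC =====
def Spec_lod24 (val : Int) (out : Int) : Prop := out = lod24_alt val
instance (val : Int) (out : Int) : Decidable (Spec_lod24 val out) := by unfold Spec_lod24; infer_instance

-- ===== CLAIM (what is proved, stated in full; the proofs are below) =====
def Claim_equal_lod24 : Prop := ∀ (val : Int), Dom_lod24 val → Spec_lod24 val (lod24 val)

-- ===== LEMMAS AND PROOFS =====

-- masking with 0xFFFFFF is taking the value mod 2^24 (Python two's-complement semantics)
theorem pv_band_mask (a : Int) : PySem.Int.band a 16777215 = a % 16777216 := by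
  by_cases ha : 0 ≤ a
  · simp only [PySem.Int.band, ha, if_true, show (0:Int) ≤ 16777215 by norm_num]
    have h : a.toNat &&& (16777215 : Int).toNat = a.toNat % 16777216 := by
      have := Nat.and_two_pow_sub_one_eq_mod a.toNat 24
      norm_num at this ⊢
      exact this
    rw [h]; omega
  · simp only [PySem.Int.band, ha, if_false, show (0:Int) ≤ 16777215 by norm_num, if_true]
    have h : (16777215 : Int).toNat &&& (-a - 1).toNat = (-a - 1).toNat % 16777216 := by
      rw [Nat.and_comm]
      have := Nat.and_two_pow_sub_one_eq_mod (-a - 1).toNat 24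
      norm_num at this ⊢
      exact this
    rw [h]; omega

-- log2 is determined by its bracketing powers of two
theorem pv_log2_unique (n k : Nat) (h1 : 2 ^ k ≤ n) (h2 : n < 2 ^ (k + 1)) :
    Nat.log2 n = k := by
  have hn0 : n ≠ 0 := by
    intro h; subst h; have := Nat.two_pow_pos k; omega
  rcases lt_trichotomy (Nat.log2 n) k with h | h | h
  · have := Nat.lt_log2_self (n := n)
    have hle : 2 ^ (Nat.log2 n + 1) ≤ 2 ^ k := Nat.pow_le_pow_right (by norm_num) (by omega)
    omega
  · exact h
  · have := Nat.log2_self_le hn0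
    have hle : 2 ^ (k + 1) ≤ 2 ^ (Nat.log2 n) := Nat.pow_le_pow_right (by norm_num) (by omega)
    omega

-- A's loop test on bit i (i < 24) reads exactly bit i of val mod 2^24
theorem pv_band_bit (a : Int) (i : Nat) (hi : i < 24) :
    (PySem.Int.band a ((1 : Int) <<< (i : Int)) ≠ 0) ↔
      Nat.testBit (a % 16777216).toNat i = true := by
  have hsh : ((1 : Int) <<< (i : Int)) = ((2 ^ i : Nat) : Int) := Int.one_shiftLeft i
  have hbpos : (0 : Int) ≤ ((2 ^ i : Nat) : Int) := by positivity
  have hbToNat : (((2 ^ i : Nat) : Int)).toNat = 2 ^ i := by omega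
  have hpow : 0 < 2 ^ i := Nat.two_pow_pos i
  by_cases ha : 0 ≤ a
  · simp only [hsh, PySem.Int.band, ha, hbpos, if_true, hbToNat]
    rw [Nat.and_two_pow]
    have hmod : (a % 16777216).toNat = a.toNat % 16777216 := by omega
    rw [hmod, show (16777216 : Nat) = 2 ^ 24 from by norm_num, Nat.testBit_mod_two_pow]
    simp only [hi, decide_true, Bool.true_and]
    cases h : a.toNat.testBit i <;> simp
  · simp only [hsh, PySem.Int.band, ha, hbpos, if_true, if_false, hbToNat]
    set w := (-a - 1).toNat with hw
    rw [Nat.and_comm, Nat.and_two_pow]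
    have hmod : (a % 16777216).toNat = 2 ^ 24 - (w % 2 ^ 24 + 1) := by norm_num; omega
    have hwlt : w % 2 ^ 24 < 2 ^ 24 := Nat.mod_lt _ (Nat.two_pow_pos 24)
    rw [hmod, Nat.testBit_two_pow_sub_succ hwlt, Nat.testBit_mod_two_pow]
    simp only [hi, decide_true, Bool.true_and]
    cases h : w.testBit i <;> simp

-- the scan over range N returns the highest set bit of n (or 0), for n < 2^N
theorem pv_loop_char (N : Nat) : ∀ (n : Nat), n < 2 ^ N →
    (PySem.List.pyRange 0 (N : Int)).foldl
      (fun k i => if Nat.testBit n i.toNat then i else k) 0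
    = if n = 0 then 0 else (Nat.log2 n : Int) := by
  induction N with
  | zero =>
    intro n hn
    have : n = 0 := by omega
    simp [this, PySem.List.pyRange_one_eq_nil (by norm_num : (0:Int) ≤ 0)]
  | succ N ih =>
    intro n hn
    have hNpos : (0 : Int) ≤ (N : Int) := by positivity
    rw [show ((N + 1 : Nat) : Int) = (N : Int) + 1 from by push_cast; ring,
      PySem.List.pyRange_one_succ_right hNpos, List.foldl_append]
    simp only [List.foldl_cons, List.foldl_nil, Int.toNat_natCast]
    by_cases h : n.testBit N
    · simp only [h, if_true]
      have hdiv : n / 2 ^ N % 2 = 1 := by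
        have := @Nat.testBit_eq_decide_div_mod_eq N n
        rw [h] at this; exact of_decide_eq_true this.symm
      have hge : 2 ^ N ≤ n := by
        rw [← Nat.one_le_div_iff (Nat.two_pow_pos N)]
        generalize hq : n / 2 ^ N = q at hdiv
        omega
      have hn0 : n ≠ 0 := by intro h0; rw [h0] at hge; omega
      rw [if_neg hn0, pv_log2_unique n N hge hn]
    · simp only [h]
      have hfalse : n.testBit N = false := by simpa using h
      have hdiv : n / 2 ^ N % 2 = 0 := by
        have := @Nat.testBit_eq_decide_div_mod_eq N n
        rw [hfalse] at this
        have := of_decide_eq_false this.symm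
        omega
      have hlt2 : n / 2 ^ N < 2 := by
        rw [Nat.div_lt_iff_lt_mul (Nat.two_pow_pos N)]
        calc n < 2 ^ (N + 1) := hn
        _ = 2 * 2 ^ N := by ring
      have hz : n / 2 ^ N = 0 := by
        generalize hq : n / 2 ^ N = q at hdiv hlt2
        omega
      have hlt : n < 2 ^ N := by
        rcases (Nat.div_eq_zero_iff).mp hz with h0 | h0
        · exact absurd h0 (Nat.two_pow_pos N).ne'
        · exact h0
      exact ih n hlt

-- bit_length of a positive n is log2 n + 1
theorem pv_bitLength_log2 (n : Nat) (hn : n ≠ 0) :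
    (PySem.Int.bitLength (n : Int) : Int) - 1 = (Nat.log2 n : Int) := by
  have h1 := PySem.Int.two_pow_bitLength_le (n : Int) (by exact_mod_cast hn)
  have h2 := PySem.Int.lt_two_pow_bitLength (n : Int)
  rw [Int.natAbs_natCast] at h1 h2
  set b := PySem.Int.bitLength (n : Int) with hb
  have hb1 : 1 ≤ b := by
    by_contra h
    have : b = 0 := by omega
    rw [this] at h2; simp at h2; omega
  have : Nat.log2 n = b - 1 := by
    apply pv_log2_unique n (b - 1) h1
    rw [show b - 1 + 1 = b from by omega]; exact h2
  rw [this]; omega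

-- ===== VERDICT (by name: the statement is the Claim_ definition above) =====
theorem lod24_spec : Claim_equal_lod24 := by
  intro val _
  unfold Spec_lod24 lod24 lod24_alt
  show _ = (if PySem.Int.band val 16777215 ≠ 0 then
      (PySem.Int.bitLength (PySem.Int.band val 16777215) : Int) - 1 else 0)
  rw [pv_band_mask]
  set n := (val % 16777216).toNat with hn
  have hmnn : (0 : Int) ≤ val % 16777216 := Int.emod_nonneg val (by norm_num)
  have hmcast : val % 16777216 = (n : Int) := by omega
  have hnlt : n < 2 ^ 24 := by omega
  by_cases hv : val = 0
  · subst hv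
    norm_num
  · rw [if_neg hv]
    rw [PySem.List.foldl_congr_mem _ _
      (fun k i => if Nat.testBit n i.toNat then i else k) 0
      (by
        intro acc x hx
        rcases PySem.List.mem_pyRange_one.mp hx with ⟨hx0, hx24⟩
        have hxlt : x.toNat < 24 := by omega
        have hiff := pv_band_bit val x.toNat hxlt
        rw [hmcast, Int.toNat_natCast] at hiff
        exact if_congr (by rw [hiff]) rfl rfl)]
    rw [show (24 : Int) = ((24 : Nat) : Int) from by norm_num, pv_loop_char 24 n hnlt]
    rw [hmcast]
    by_cases hn0 : n = 0
    · simp [hn0]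
    · rw [if_neg hn0, if_pos (by exact_mod_cast hn0 : ¬ ((n : Int) = 0))]
      exact (pv_bitLength_log2 n hn0).symm
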